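-- pv_equiv track=rewrite | github.com/paranoidandroid2124/ko-finance | scripts/eval_hybrid.py | _top_k_hit
-- ===== SOURCE A (Python) =====
-- from typing import Any, Dict, List, Optional, Sequence
--
-- def _top_k_hit(ranking: Sequence[str], positives: Sequence[str]) -> Optional[int]:
--     positive_set = {value for value in positives if value}
--     if not positive_set:
--         return None
--     for idx, doc_id in enumerate(ranking, start=1):
--         if doc_id in positive_set:
--             return idx
--     return None
-- ===== SOURCE B (Python) =====
-- def _top_k_hit(ranking, positives):
--     pos_of = {}
--     for idx, doc_id in enumerate(ranking, start=1):
--         if doc_id not in pos_of: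
--             pos_of[doc_id] = idx
--     hits = [pos_of[p] for p in positives if p and p in pos_of]
--     return min(hits) if hits else None
-- ===== Notes on version B (the rewrite author's own statement) =====
-- stated objective: alternative
-- what changed: Instead of scanning the ranking with an early exit against a positives set, B indexes the ranking once into a dict of first 1-based positions and returns the minimum position over the truthy positives, reversing the traversal direction.
import Mathlib
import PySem

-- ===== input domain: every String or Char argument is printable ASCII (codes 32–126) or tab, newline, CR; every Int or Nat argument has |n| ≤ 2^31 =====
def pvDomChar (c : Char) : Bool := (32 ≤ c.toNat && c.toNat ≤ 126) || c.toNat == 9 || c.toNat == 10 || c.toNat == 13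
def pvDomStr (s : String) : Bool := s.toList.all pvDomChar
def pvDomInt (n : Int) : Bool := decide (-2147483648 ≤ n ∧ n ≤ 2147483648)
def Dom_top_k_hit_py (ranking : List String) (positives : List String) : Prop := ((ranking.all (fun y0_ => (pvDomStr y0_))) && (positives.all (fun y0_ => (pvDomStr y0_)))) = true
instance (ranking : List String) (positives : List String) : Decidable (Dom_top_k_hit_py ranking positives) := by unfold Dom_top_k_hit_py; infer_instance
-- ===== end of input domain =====

-- B replaces A's early-exit scan of the ranking against a positives set by a dict of first
-- positions indexed once from the ranking, then a minimum over the truthy positives (alternative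
-- decomposition, same cost).

-- ===== PORT A =====
-- the 'for idx, doc_id in enumerate(ranking, start=1): if doc_id in positive_set: return idx' loop
def topKHitLoop (s : PySem.Set String) : List String → Int → Option Int
  | [], _ => none
  | d :: rest, i => if PySem.Set.contains s d then some i else topKHitLoop s rest (i + 1)

def top_k_hit_py (ranking : List String) (positives : List String) : Option Int :=
  let positiveSet : PySem.Set String := PySem.Set.ofList (positives.filter (fun v => v != ""))
  if positiveSet = [] then none
  else topKHitLoop positiveSet ranking 1

-- ===== PORT B =====
def top_k_hit_py_alt (ranking : List String) (positives : List String) : Option Int :=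
  -- pos_of = {}; for idx, doc_id in enumerate(ranking, 1): if doc_id not in pos_of: pos_of[doc_id] = idx
  let posOf : PySem.Dict String Int :=
    (ranking.foldl (fun (st : PySem.Dict String Int × Int) d =>
        (if st.1.contains d then st.1 else st.1.insert d st.2, st.2 + 1))
      (PySem.Dict.empty, (1 : Int))).1
  -- hits = [pos_of[p] for p in positives if p and p in pos_of]
  let hits : List Int := positives.filterMap (fun p => if p != "" then posOf.get? p else none)
  -- min(hits) if hits else None
  if hits = [] then none else PySem.List.min? hits (fun x => x)

-- ===== PRECONDITION & SPEC =====
def Spec_top_k_hit_py (ranking : List String) (positives : List String) (out : Option Int) : Prop := out = top_k_hit_py_alt ranking positives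
instance (ranking : List String) (positives : List String) (out : Option Int) : Decidable (Spec_top_k_hit_py ranking positives out) := by unfold Spec_top_k_hit_py; infer_instance

-- ===== CLAIM (what is proved, stated in full; the proofs are below) =====
def Claim_equal_top_k_hit_py : Prop := ∀ (ranking : List String) (positives : List String), Dom_top_k_hit_py ranking positives → Spec_top_k_hit_py ranking positives (top_k_hit_py ranking positives)

-- ===== LEMMAS AND PROOFS =====

-- first 1-based-from-i position of k in a list (specification device for both ports)
def firstPos : List String → Int → String → Option Int
  | [], _, _ => none
  | d :: r, i, k => if d = k then some i else firstPos r (i + 1) k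

theorem firstPos_ge (xs : List String) (i : Int) (k : String) (v : Int)
    (h : firstPos xs i k = some v) : i ≤ v := by
  induction xs generalizing i with
  | nil => simp [firstPos] at h
  | cons d r ih =>
    simp only [firstPos] at h
    split at h
    · exact le_of_eq (Option.some.inj h)
    · have := ih (i + 1) h; omega

-- the dict built by B's loop answers get? with the first position
theorem build_get? (xs : List String) (D : PySem.Dict String Int) (i : Int) (k : String) :
    ((xs.foldl (fun (st : PySem.Dict String Int × Int) d =>
        (if st.1.contains d then st.1 else st.1.insert d st.2, st.2 + 1)) (D, i)).1).get? k
      = if D.contains k then D.get? k else firstPos xs i k := by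
  induction xs generalizing D i with
  | nil => by_cases h : D.contains k <;> simp [firstPos, h, PySem.Dict.get?_eq_none_iff_contains]
  | cons d r ih =>
    simp only [List.foldl_cons]
    rw [ih]
    by_cases hd : D.contains d = true
    · rw [if_pos hd]
      by_cases hk : D.contains k = true
      · simp [hk]
      · rw [if_neg hk, if_neg hk]
        have hne : ¬ d = k := fun h => hk (h ▸ hd)
        simp [firstPos, hne]
    · rw [if_neg hd]
      by_cases hdk : d = k
      · subst hdk
        rw [if_pos (by simp [PySem.Dict.contains_insert_self]), if_neg hd,
            PySem.Dict.get?_insert_self]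
        simp [firstPos]
      · have hc : (D.insert d i).contains k = D.contains k := by
          rw [PySem.Dict.contains_insert]
          have : (k == d) = false := by simp [Ne.symm hdk]
          simp [this]
        rw [hc, PySem.Dict.get?_insert]
        simp only [firstPos, if_neg hdk, if_neg (show ¬ k = d from fun h => hdk (Eq.symm h))]

theorem loop_nilset (xs : List String) (i : Int) :
    topKHitLoop ([] : PySem.Set String) xs i = none := by
  induction xs generalizing i with
  | nil => rfl
  | cons d r ih => simp [topKHitLoop, PySem.Set.contains, ih]

-- A's scan equals "min over the truthy positives of their first position"
theorem loop_eq (ps : List String) (xs : List String) (i : Int) :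
    topKHitLoop (PySem.Set.ofList (ps.filter (fun v => v != ""))) xs i
      = (let hits := ps.filterMap (fun p => if p != "" then firstPos xs i p else none);
         if hits = [] then none else PySem.List.min? hits (fun x => x)) := by
  induction xs generalizing i with
  | nil =>
    simp only [topKHitLoop, firstPos]
    simp
  | cons d r ih =>
    simp only [topKHitLoop]
    by_cases hd : PySem.Set.contains (PySem.Set.ofList (ps.filter (fun v => v != ""))) d = true
    · rw [if_pos hd]
      have hmem : d ∈ ps ∧ (d != "") = true := by
        have := (PySem.Set.contains_iff _ _).mp hd
        rw [PySem.Set.mem_ofList] at this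
        exact List.mem_filter.mp this
      set hits := ps.filterMap (fun p => if p != "" then firstPos (d :: r) i p else none) with hh
      have hi_mem : i ∈ hits := by
        rw [hh, List.mem_filterMap]
        exact ⟨d, hmem.1, by simp [hmem.2, firstPos]⟩
      have hlb : ∀ x ∈ hits, i ≤ x := by
        intro x hx
        rw [hh, List.mem_filterMap] at hx
        obtain ⟨p, _, hp⟩ := hx
        split at hp
        · simp only [firstPos] at hp
          split at hp
          · exact le_of_eq (Option.some.inj hp)
          · have := firstPos_ge r (i + 1) p x hp; omega
        · exact absurd hp (by simp)
      have hne : hits ≠ [] := fun h => by rw [h] at hi_mem; exact absurd hi_mem (List.not_mem_nil)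
      rw [if_neg hne]
      cases hmin : PySem.List.min? hits (fun x => x) with
      | none => exact absurd ((PySem.List.min?_eq_none_iff _ _).mp hmin) hne
      | some m =>
        have hm_mem := PySem.List.min?_mem hmin
        have hm_min := PySem.List.min?_isMin hmin i hi_mem
        have := hlb m hm_mem
        have hmi : m = i := le_antisymm hm_min this
        simp [hmi]
    · rw [if_neg hd]
      have hnot : ∀ p ∈ ps, (p != "") = true → ¬ d = p := by
        intro p hp hne hdp
        subst hdp
        apply hd
        rw [PySem.Set.contains_iff, PySem.Set.mem_ofList]
        exact List.mem_filter.mpr ⟨hp, hne⟩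
      have hcong : ps.filterMap (fun p => if p != "" then firstPos (d :: r) i p else none)
          = ps.filterMap (fun p => if p != "" then firstPos r (i + 1) p else none) := by
        apply List.filterMap_congr
        intro p hp
        by_cases he : (p != "") = true
        · simp only [he, if_true, firstPos, if_neg (hnot p hp he)]
        · simp [he]
      rw [ih (i + 1)]
      simp only [hcong]

-- ===== VERDICT (by name: the statement is the Claim_ definition above) =====
theorem top_k_hit_py_spec : Claim_equal_top_k_hit_py := by
  intro ranking positives _
  unfold Spec_top_k_hit_py top_k_hit_py top_k_hit_py_alt
  have hB : positives.filterMap (fun p =>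
        if p != "" then
          ((ranking.foldl (fun (st : PySem.Dict String Int × Int) d =>
              (if st.1.contains d then st.1 else st.1.insert d st.2, st.2 + 1))
            (PySem.Dict.empty, (1 : Int))).1).get? p
        else none)
      = positives.filterMap (fun p => if p != "" then firstPos ranking 1 p else none) := by
    apply List.filterMap_congr
    intro p _
    rw [build_get? ranking PySem.Dict.empty 1 p]
    simp [PySem.Dict.contains_empty]
  simp only [hB]
  by_cases hs : PySem.Set.ofList (positives.filter (fun v => v != "")) = ([] : PySem.Set String)
  · rw [if_pos hs]
    have := loop_eq positives ranking 1
    rw [hs, loop_nilset] at this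
    exact this
  · rw [if_neg hs]
    exact loop_eq positives ranking 1
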